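-- pv_equiv track=rewrite | github.com/vaasut/scrabbleFun | scrabbleSimulation.py | wordInRack
-- ===== SOURCE A (Python) =====
-- import random, copy
--
-- def wordInRack(word,rack):
--     #check if word in rack. blanks are ? symbol.
--     rackCopy = copy.deepcopy(rack) #don't modify the rack
--     missing = 0
--     for letter in word:
--         if letter in rackCopy:
--             rackCopy.remove(letter)
--         else:
--             missing += 1
--     for i in range(2):
--         if "?" in rackCopy:
--             rackCopy.remove("?")
--             missing -= 1
--     if missing <= 0:
--         return True
--     return False
-- ===== SOURCE B (Python) =====
-- def wordInRack(word, rack):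
--     # Counting approach: build frequency tables once instead of scanning/mutating the rack per letter.
--     have = {}
--     for t in rack:
--         have[t] = have.get(t, 0) + 1
--     need = {}
--     for ch in word:
--         need[ch] = need.get(ch, 0) + 1
--     matched = sum(min(n, have.get(c, 0)) for c, n in need.items())
--     blanks = have.get('?', 0) - min(need.get('?', 0), have.get('?', 0))
--     return len(word) - matched - min(2, blanks) <= 0
-- ===== Notes on version B (the rewrite author's own statement) =====
-- stated objective: alternative
-- what changed: Replaces A's per-letter linear scan-and-remove on a mutated rack copy by frequency counters built once for word and rack, computing matched = sum of per-letter minima and leftover blanks arithmetically.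
import Mathlib
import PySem

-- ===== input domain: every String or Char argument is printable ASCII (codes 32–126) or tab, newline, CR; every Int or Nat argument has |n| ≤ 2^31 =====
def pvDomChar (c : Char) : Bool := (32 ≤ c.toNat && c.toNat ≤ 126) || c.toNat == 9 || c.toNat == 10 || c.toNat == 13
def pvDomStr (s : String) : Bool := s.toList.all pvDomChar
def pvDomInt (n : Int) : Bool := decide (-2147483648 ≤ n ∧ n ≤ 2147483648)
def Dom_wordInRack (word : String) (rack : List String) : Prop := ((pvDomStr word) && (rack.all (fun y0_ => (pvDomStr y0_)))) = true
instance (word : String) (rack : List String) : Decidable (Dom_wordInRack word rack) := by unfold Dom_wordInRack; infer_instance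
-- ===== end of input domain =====

-- B replaces A's per-letter rack scan-and-remove with frequency counters built once (alternative
-- decomposition; same observable return value — A only mutates a deep copy, so no side effects).

-- ===== PORT A =====
def wordInRack (word : String) (rack : List String) : Bool :=
  -- rackCopy := deepcopy(rack); missing := 0; first loop over the letters of word
  let st := word.toList.foldl
    (fun (st : List String × Int) letter =>
      if String.ofList [letter] ∈ st.1 then
        ((PySem.List.remove? st.1 (String.ofList [letter])).getD st.1, st.2)
      else
        (st.1, st.2 + 1))
    (rack, 0)
  -- for i in range(2): remove a "?" if present, missing -= 1
  let st2 := (PySem.List.pyRange 0 2 1).foldl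
    (fun (st : List String × Int) _ =>
      if "?" ∈ st.1 then ((PySem.List.remove? st.1 "?").getD st.1, st.2 - 1)
      else st)
    st
  decide (st2.2 ≤ 0)

-- ===== PORT B =====
def wordInRack_alt (word : String) (rack : List String) : Bool :=
  let haveD := rack.foldl (fun (d : PySem.Dict String Int) t => d.insert t (d.getD t 0 + 1)) PySem.Dict.empty
  let needD := word.toList.foldl
    (fun (d : PySem.Dict String Int) ch => d.insert (String.ofList [ch]) (d.getD (String.ofList [ch]) 0 + 1))
    PySem.Dict.empty
  let matched := (needD.items.map (fun p => min p.2 (haveD.getD p.1 0))).sum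
  let blanks := haveD.getD "?" 0 - min (needD.getD "?" 0) (haveD.getD "?" 0)
  decide ((PySem.Str.len word : Int) - matched - min 2 blanks ≤ 0)

-- ===== PRECONDITION & SPEC =====
def Spec_wordInRack (word : String) (rack : List String) (out : Bool) : Prop := out = wordInRack_alt word rack
instance (word : String) (rack : List String) (out : Bool) : Decidable (Spec_wordInRack word rack out) := by unfold Spec_wordInRack; infer_instance

-- ===== CLAIM (what is proved, stated in full; the proofs are below) =====
def Claim_equal_wordInRack : Prop := ∀ (word : String) (rack : List String), Dom_wordInRack word rack → Spec_wordInRack word rack (wordInRack word rack)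

-- ===== LEMMAS AND PROOFS =====

-- the word as the list of one-character strings Python iterates over
def pvLetters (word : String) : List String := word.toList.map (fun c => String.ofList [c])

-- A's first loop, keyed directly on strings
def pvStepA (st : List String × Int) (x : String) : List String × Int :=
  if x ∈ st.1 then ((PySem.List.remove? st.1 x).getD st.1, st.2) else (st.1, st.2 + 1)

lemma pvStepA_mem (rc : List String) (m : Int) (x : String) (hx : x ∈ rc) :
    pvStepA (rc, m) x = (rc.erase x, m) := by
  simp [pvStepA, hx, PySem.List.remove?_eq_some_erase rc x hx]

lemma pvStepA_not_mem (rc : List String) (m : Int) (x : String) (hx : x ∉ rc) :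
    pvStepA (rc, m) x = (rc, m + 1) := by
  simp [pvStepA, hx]

-- invariant for A's first loop: the rack becomes the multiset difference, missing counts the unmatched letters
lemma pvLoop1 (l : List String) : ∀ (rc : List String) (m : Int),
    ((l.foldl pvStepA (rc, m)).1 : Multiset String) = (↑rc : Multiset String) - ↑l ∧
    (l.foldl pvStepA (rc, m)).2 = m + (((↑l : Multiset String) - ↑rc).card : Int) := by
  induction l with
  | nil => intro rc m; simp
  | cons x xs ih =>
    intro rc m
    by_cases hx : x ∈ rc
    · rw [List.foldl_cons, pvStepA_mem rc m x hx]
      obtain ⟨h1, h2⟩ := ih (rc.erase x) m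
      have hcx : 1 ≤ rc.count x := List.one_le_count_iff.mpr hx
      constructor
      · rw [h1, ← Multiset.coe_erase, ← Multiset.cons_coe, Multiset.sub_cons]
      · rw [h2]
        have hms : ((↑(x :: xs) : Multiset String) - ↑rc)
            = (↑xs : Multiset String) - ↑(rc.erase x) := by
          ext v
          simp only [Multiset.count_sub, Multiset.coe_count, List.count_cons, List.count_erase]
          by_cases hv : v = x
          · subst hv; simp; omega
          · have : ¬ (x == v) = true := by simpa [beq_iff_eq] using (Ne.symm hv)
            simp [this]
        rw [hms]
    · rw [List.foldl_cons, pvStepA_not_mem rc m x hx]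
      obtain ⟨h1, h2⟩ := ih rc (m + 1)
      have hc0 : rc.count x = 0 := List.count_eq_zero.mpr hx
      constructor
      · rw [h1]
        ext v
        simp only [Multiset.count_sub, Multiset.coe_count, List.count_cons]
        by_cases hv : v = x
        · subst hv; simp [hc0]
        · have : ¬ (x == v) = true := by simpa [beq_iff_eq] using (Ne.symm hv)
          simp [this]
      · rw [h2]
        have hms : ((↑(x :: xs) : Multiset String) - ↑rc)
            = x ::ₘ ((↑xs : Multiset String) - ↑rc) := by
          ext v
          simp only [Multiset.count_sub, Multiset.coe_count, List.count_cons, Multiset.count_cons]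
          by_cases hv : v = x
          · subst hv; simp [hc0]
          · have : ¬ (x == v) = true := by simpa [beq_iff_eq] using (Ne.symm hv)
            simp [this, hv]
        rw [hms]
        simp
        omega

-- A's second loop subtracts min 2 (number of "?" left)
lemma pvLoop2 (rc : List String) (m : Int) :
    ((PySem.List.pyRange 0 2 1).foldl
      (fun (st : List String × Int) _ =>
        if "?" ∈ st.1 then ((PySem.List.remove? st.1 "?").getD st.1, st.2 - 1) else st)
      (rc, m)).2 = m - min 2 (rc.count "?" : Int) := by
  have hr : PySem.List.pyRange 0 2 1 = [0, 1] := by decide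
  rw [hr]
  by_cases h1 : "?" ∈ rc
  · have hc1 : 1 ≤ rc.count "?" := List.one_le_count_iff.mpr h1
    simp only [List.foldl_cons, List.foldl_nil, h1, if_true,
      PySem.List.remove?_eq_some_erase rc "?" h1, Option.getD_some]
    have hce : (rc.erase "?").count "?" = rc.count "?" - 1 := List.count_erase_self
    by_cases h2 : "?" ∈ rc.erase "?"
    · have hc2 : 1 ≤ (rc.erase "?").count "?" := List.one_le_count_iff.mpr h2
      simp only [h2, if_true, PySem.List.remove?_eq_some_erase _ "?" h2, Option.getD_some]
      have h2le : 2 ≤ rc.count "?" := by omega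
      have : min 2 ((rc.count "?" : Int)) = 2 := by
        have : (2 : Int) ≤ (rc.count "?" : Int) := by exact_mod_cast h2le
        omega
      rw [this]
      omega
    · have hcz : (rc.erase "?").count "?" = 0 := List.count_eq_zero.mpr h2
      have hone : rc.count "?" = 1 := by omega
      have : min 2 ((rc.count "?" : Int)) = 1 := by rw [hone]; rfl
      simp [h2, this]
  · have hc0 : rc.count "?" = 0 := List.count_eq_zero.mpr h1
    have h2' : "?" ∉ rc := h1
    simp [h2', hc0]

-- B's matched sum is the cardinality of the multiset intersection
lemma pvMatched (wl rack : List String) :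
    (((PySem.Set.ofList wl : List String).map (fun k => (k, (wl.count k : Int)))).map
        (fun p => min p.2 (rack.count p.1 : Int))).sum
      = (((↑wl : Multiset String) ∩ ↑rack).card : Int) := by
  rw [List.map_map]
  have hnd : (PySem.Set.ofList wl : List String).Nodup := PySem.Set.nodup_ofList wl
  have hmap : ((PySem.Set.ofList wl : List String).map
      ((fun p : String × Int => min p.2 (rack.count p.1 : Int)) ∘ (fun k => (k, (wl.count k : Int)))))
      = ((PySem.Set.ofList wl : List String).map
          (fun k => min ((wl.count k : Int)) ((rack.count k : Int)))) := by
    simp [Function.comp]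
  rw [hmap, ← List.sum_toFinset _ hnd]
  have hfs : (PySem.Set.ofList wl : List String).toFinset = wl.toFinset := by
    ext v; simp [PySem.Set.mem_ofList]
  rw [hfs, ← Multiset.toFinset_sum_count_eq ((↑wl : Multiset String) ∩ ↑rack)]
  push_cast
  have hsub : ((↑wl : Multiset String) ∩ ↑rack).toFinset ⊆ wl.toFinset := by
    intro a ha
    rw [Multiset.mem_toFinset, Multiset.mem_inter] at ha
    exact List.mem_toFinset.mpr (by exact_mod_cast ha.1)
  rw [← Finset.sum_subset hsub (by
    intro a _ ha
    rw [Multiset.mem_toFinset] at ha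
    have h0 : Multiset.count a ((↑wl : Multiset String) ∩ ↑rack) = 0 :=
      Multiset.count_eq_zero.mpr ha
    rw [Multiset.count_inter, Multiset.coe_count, Multiset.coe_count] at h0
    omega)]
  apply Finset.sum_congr rfl
  intro a _
  rw [Multiset.count_inter, Multiset.coe_count, Multiset.coe_count]
  push_cast
  rfl

-- ===== VERDICT (by name: the statement is the Claim_ definition above) =====
theorem wordInRack_spec : Claim_equal_wordInRack := by
  intro word rack _
  unfold Spec_wordInRack wordInRack wordInRack_alt
  have hfoldA : word.toList.foldl
      (fun (st : List String × Int) letter =>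
        if String.ofList [letter] ∈ st.1 then
          ((PySem.List.remove? st.1 (String.ofList [letter])).getD st.1, st.2)
        else (st.1, st.2 + 1)) (rack, 0)
      = (pvLetters word).foldl pvStepA (rack, 0) := by
    rw [pvLetters, List.foldl_map]; rfl
  have hneed : word.toList.foldl
      (fun (d : PySem.Dict String Int) ch => d.insert (String.ofList [ch]) (d.getD (String.ofList [ch]) 0 + 1))
      PySem.Dict.empty = PySem.Dict.counter (pvLetters word) := by
    rw [pvLetters, ← PySem.Dict.foldl_insert_getD_add_one_eq_counter, List.foldl_map]
  have hhave : rack.foldl (fun (d : PySem.Dict String Int) t => d.insert t (d.getD t 0 + 1)) PySem.Dict.empty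
      = PySem.Dict.counter rack := PySem.Dict.foldl_insert_getD_add_one_eq_counter rack
  simp only [hfoldA, hneed, hhave]
  set wl := pvLetters word with hwl
  obtain ⟨h1, h2⟩ := pvLoop1 wl rack 0
  have hq : ((wl.foldl pvStepA (rack, 0)).1).count "?"
      = rack.count "?" - wl.count "?" := by
    have := congrArg (Multiset.count "?") h1
    simp only [Multiset.count_sub, Multiset.coe_count] at this
    exact this
  rw [show (wl.foldl pvStepA (rack, 0))
      = ((wl.foldl pvStepA (rack, 0)).1, (wl.foldl pvStepA (rack, 0)).2) from rfl]
  rw [pvLoop2]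
  rw [PySem.Dict.items_counter]
  simp only [PySem.Dict.getD_counter]
  rw [pvMatched wl rack]
  have hlen : (PySem.Str.len word : Int) = (wl.length : Int) := by
    simp [PySem.Str.len_eq, hwl, pvLetters]
  rw [hlen, h2, hq]
  have hdiff : ((↑wl : Multiset String) - ↑rack).card + ((↑wl : Multiset String) ∩ ↑rack).card
      = wl.length := by
    have := congrArg Multiset.card (Multiset.sub_add_inter (↑wl : Multiset String) ↑rack)
    simpa using this
  rw [decide_eq_decide]
  simp only [min_def]
  split_ifs <;> omega
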